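-- pv_equiv track=rewrite | github.com/Project-Corp-Astro/astro_engine_v1 | astro_engine/engine/numerology/NumerologyData.py | calculate_chaldean_numbers
-- ===== SOURCE A (Python) =====
-- chaldean_chart = {
--     'a': 1, 'i': 1, 'j': 1, 'q': 1, 'y': 1,
--     'b': 2, 'k': 2, 'r': 2,
--     'c': 3, 'g': 3, 'l': 3, 's': 3,
--     'd': 4, 'm': 4, 't': 4,
--     'e': 5, 'h': 5, 'n': 5, 'x': 5,
--     'u': 6, 'v': 6, 'w': 6,
--     'o': 7, 'z': 7,
--     'f': 8, 'p': 8
-- }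
--
-- def calculate_chaldean_numbers(name):
--     """
--     Calculate the compound and root numbers for a name using Chaldean numerology.
--     Only alphabetic characters are processed.
--
--     Args:
--         name (str): The business name or tagline.
--
--     Returns:
--         dict: Contains 'compound_number' and 'root_number'.
--     """
--     name_lower = name.lower()
--     total = 0
--     for char in name_lower:
--         if char in chaldean_chart:
--             total += chaldean_chart[char]
--     compound_number = total
--     if total in [11, 22, 33]:
--         root_number = total
--     else:
--         while total > 9:
--             total = sum(int(digit) for digit in str(total))
--         root_number = total
--     return {"compound_number": compound_number, "root_number": root_number}
-- ===== SOURCE B (Python) =====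
-- chaldean_chart = {
--     'a': 1, 'i': 1, 'j': 1, 'q': 1, 'y': 1,
--     'b': 2, 'k': 2, 'r': 2,
--     'c': 3, 'g': 3, 'l': 3, 's': 3,
--     'd': 4, 'm': 4, 't': 4,
--     'e': 5, 'h': 5, 'n': 5, 'x': 5,
--     'u': 6, 'v': 6, 'w': 6,
--     'o': 7, 'z': 7,
--     'f': 8, 'p': 8
-- }
--
-- def calculate_chaldean_numbers(name):
--     # pass 1: a character-frequency table of the lowered name
--     freq = {}
--     for ch in name.lower():
--         freq[ch] = freq.get(ch, 0) + 1
--     # pass 2: one term per chart letter, weighted by its frequency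
--     total = sum(value * freq.get(letter, 0) for letter, value in chaldean_chart.items())
--     if total in (11, 22, 33):
--         root = total
--     elif total == 0:
--         root = 0
--     else:
--         # closed-form digital root instead of the repeated digit-sum loop
--         root = 1 + (total - 1) % 9
--     return {"compound_number": total, "root_number": root}
-- ===== Notes on version B (the rewrite author's own statement) =====
-- stated objective: alternative
-- what changed: The per-character membership-test accumulation over the name is replaced by a Counter-style two-pass scheme (build a character-frequency dict, then sum value*frequency over the chart's items), and the iterative repeated digit-sum while-loop is replaced by the closed-form digital root 1 + (total-1) % 9 (0 for 0, master numbers 11/22/33 kept).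
import Mathlib
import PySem

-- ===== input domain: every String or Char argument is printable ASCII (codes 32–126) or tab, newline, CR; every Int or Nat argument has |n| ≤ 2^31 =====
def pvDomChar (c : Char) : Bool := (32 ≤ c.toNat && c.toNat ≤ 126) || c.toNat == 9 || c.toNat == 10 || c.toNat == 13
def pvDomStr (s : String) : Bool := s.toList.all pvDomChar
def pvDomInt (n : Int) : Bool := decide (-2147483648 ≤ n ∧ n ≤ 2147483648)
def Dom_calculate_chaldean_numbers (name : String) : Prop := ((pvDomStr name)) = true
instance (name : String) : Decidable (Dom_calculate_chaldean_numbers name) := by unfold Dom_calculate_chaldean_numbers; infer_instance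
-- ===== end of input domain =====

-- B replaces A's per-character membership-test accumulation by a Counter-style two-pass scheme
-- (frequency dict of the lowered name, then value*frequency summed over the chart items) and
-- A's iterated digit-sum while-loop by the closed-form digital root 1 + (total-1) % 9 (alternative).


-- ===== PORT A =====
-- the module-level constant dict chaldean_chart as A uses it: membership test + indexing,
-- ported as its lookup function (none = key absent; dict order is never observed by A)
def a_chart (c : Char) : Option Int :=
  match c with
  | 'a' => some 1 | 'i' => some 1 | 'j' => some 1 | 'q' => some 1 | 'y' => some 1
  | 'b' => some 2 | 'k' => some 2 | 'r' => some 2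
  | 'c' => some 3 | 'g' => some 3 | 'l' => some 3 | 's' => some 3
  | 'd' => some 4 | 'm' => some 4 | 't' => some 4
  | 'e' => some 5 | 'h' => some 5 | 'n' => some 5 | 'x' => some 5
  | 'u' => some 6 | 'v' => some 6 | 'w' => some 6
  | 'o' => some 7 | 'z' => some 7
  | 'f' => some 8 | 'p' => some 8
  | _ => none

-- sum(int(digit) for digit in str(total)); the chars of str(total) are '0'..'9' here
-- (total is nonnegative), so '.getD 0' on int(digit) is a totality guard only
def a_digitSum (t : Int) : Int :=
  ((PySem.Int.toChars t).map (fun d => (PySem.Int.ofChars? [d]).getD 0)).sum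

-- 'while total > 9: total = sum(int(digit) for digit in str(total))';
-- fuel (called with total.toNat, an upper bound on the iteration count) is a totality guard only
def a_reduce : Nat → Int → Int
  | 0, t => t
  | fuel + 1, t => if 9 < t then a_reduce fuel (a_digitSum t) else t

def calculate_chaldean_numbers (name : String) : List (String × Int) :=
  let name_lower := PySem.Str.lower name
  let total := name_lower.toList.foldl
    (fun total char =>
      if (a_chart char).isSome then total + (a_chart char).getD 0 else total) 0
  let compound_number := total
  let root_number :=
    if total = 11 ∨ total = 22 ∨ total = 33 then total
    else a_reduce total.toNat total
  [("compound_number", compound_number), ("root_number", root_number)]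

-- ===== PORT B =====
-- chaldean_chart.items(): the same module constant as B iterates it, a (letter, value) list in insertion order
def b_chartItems : List (Char × Int) :=
  [('a', 1), ('i', 1), ('j', 1), ('q', 1), ('y', 1),
   ('b', 2), ('k', 2), ('r', 2),
   ('c', 3), ('g', 3), ('l', 3), ('s', 3),
   ('d', 4), ('m', 4), ('t', 4),
   ('e', 5), ('h', 5), ('n', 5), ('x', 5),
   ('u', 6), ('v', 6), ('w', 6),
   ('o', 7), ('z', 7),
   ('f', 8), ('p', 8)]

def calculate_chaldean_numbers_alt (name : String) : List (String × Int) :=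
  -- pass 1: freq[ch] = freq.get(ch, 0) + 1 over the lowered name
  let freq : PySem.Dict Char Int :=
    (PySem.Str.lower name).toList.foldl
      (fun d ch => d.insert ch (d.getD ch 0 + 1)) PySem.Dict.empty
  -- pass 2: sum(value * freq.get(letter, 0) for letter, value in chaldean_chart.items())
  let total := (b_chartItems.map (fun lv => lv.2 * freq.getD lv.1 0)).sum
  let root :=
    if total = 11 ∨ total = 22 ∨ total = 33 then total
    else if total = 0 then 0
    else 1 + PySem.Int.mod (total - 1) 9
  [("compound_number", total), ("root_number", root)]

-- ===== PRECONDITION & SPEC =====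
def Spec_calculate_chaldean_numbers (name : String) (out : List (String × Int)) : Prop := out = calculate_chaldean_numbers_alt name
instance (name : String) (out : List (String × Int)) : Decidable (Spec_calculate_chaldean_numbers name out) := by unfold Spec_calculate_chaldean_numbers; infer_instance

-- ===== CLAIM (what is proved, stated in full; the proofs are below) =====
def Claim_equal_calculate_chaldean_numbers : Prop := ∀ (name : String), Dom_calculate_chaldean_numbers name → Spec_calculate_chaldean_numbers name (calculate_chaldean_numbers name)

-- ===== LEMMAS AND PROOFS =====

-- B's frequency dict read back: freq.getD c 0 = how often c occurs in the scanned list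
lemma freq_getD (cs : List Char) (c : Char) :
    ((cs.foldl (fun d ch => d.insert ch (d.getD ch 0 + 1)) PySem.Dict.empty).getD c 0)
      = (cs.count c : Int) := by
  rw [PySem.Dict.getD_foldl_insert_add_one]
  simp [PySem.Dict.empty, PySem.Dict.getD, PySem.Dict.get?]

-- the chart seen as a weighted indicator sum: Σ over items of v * [k = c] is A's lookup value
lemma chart_delta (c : Char) :
    (b_chartItems.map (fun lv => lv.2 * (if lv.1 = c then (1 : Int) else 0))).sum
      = (a_chart c).getD 0 := by
  unfold a_chart
  split <;> simp_all [b_chartItems, eq_comm]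

-- A's single pass over the name equals B's sum over the chart weighted by occurrence counts
lemma foldl_eq_weighted_sum (cs : List Char) (acc : Int) :
    cs.foldl (fun total char =>
      if (a_chart char).isSome then total + (a_chart char).getD 0 else total) acc
      = acc + (b_chartItems.map (fun lv => lv.2 * (cs.count lv.1 : Int))).sum := by
  induction cs generalizing acc with
  | nil => simp
  | cons c cs ih =>
    rw [List.foldl_cons, ih]
    have hstep : (if (a_chart c).isSome then acc + (a_chart c).getD 0 else acc)
        = acc + (a_chart c).getD 0 := by
      cases a_chart c <;> simp
    rw [hstep, ← chart_delta c]
    have hsplit : ∀ lv : Char × Int,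
        lv.2 * ((c :: cs).count lv.1 : Int)
          = lv.2 * (if lv.1 = c then (1 : Int) else 0) + lv.2 * (cs.count lv.1 : Int) := by
      intro lv
      rw [List.count_cons]
      by_cases hb : lv.1 = c
      · simp [hb]; ring
      · simp [hb]; exact Or.inl fun h => hb h.symm
    simp only [hsplit, List.sum_map_add]
    ring

lemma chart_nonneg (lv : Char × Int) (h : lv ∈ b_chartItems) : 0 ≤ lv.2 := by
  fin_cases h <;> norm_num

lemma total_nonneg (cs : List Char) :
    0 ≤ (b_chartItems.map (fun lv => lv.2 * (cs.count lv.1 : Int))).sum :=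
  List.sum_nonneg fun x hx => by
    obtain ⟨lv, hm, rfl⟩ := List.mem_map.mp hx
    exact mul_nonneg (chart_nonneg lv hm) (Int.natCast_nonneg _)

-- int() of a single decimal digit character
lemma parse_digitChar (r : Nat) (h : r < 10) :
    (PySem.Int.ofChars? [Nat.digitChar r]).getD 0 = (r : Int) := by
  interval_cases r <;> decide

lemma core_sum (f : Nat) : ∀ (n : Nat) (ds : List Char), n < f →
    ((Nat.toDigitsCore 10 f n ds).map (fun d => (PySem.Int.ofChars? [d]).getD 0)).sum
      = ((Nat.digits 10 n).sum : Int)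
        + (ds.map (fun d => (PySem.Int.ofChars? [d]).getD 0)).sum := by
  induction f with
  | zero => intro n ds h; omega
  | succ f ih =>
    intro n ds h
    rw [Nat.toDigitsCore]
    by_cases h0 : n / 10 = 0
    · rw [if_pos h0]
      rcases Nat.eq_zero_or_pos n with hn | hn
      · subst hn; simp [parse_digitChar 0 (by norm_num)]
      · rw [Nat.digits_def' (by norm_num : 1 < 10) hn, h0]
        simp [parse_digitChar (n % 10) (Nat.mod_lt _ (by norm_num))]
    · rw [if_neg h0]
      have hn10 : 10 ≤ n := by omega
      have hlt : n / 10 < f := by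
        have := Nat.div_lt_self (by omega : 0 < n) (by norm_num : 1 < 10)
        omega
      rw [ih (n / 10) _ hlt,
          Nat.digits_def' (by norm_num : 1 < 10) (by omega : 0 < n)]
      simp [parse_digitChar (n % 10) (Nat.mod_lt _ (by norm_num))]
      ring

lemma a_digitSum_eq (t : Int) (h : 0 ≤ t) :
    a_digitSum t = ((Nat.digits 10 t.toNat).sum : Int) := by
  unfold a_digitSum PySem.Int.toChars
  rw [if_neg (by omega), Nat.toDigits]
  rw [core_sum (t.toNat + 1) t.toNat [] (Nat.lt_succ_self _)]
  simp

lemma digit_sum_lt (n : Nat) (h : 10 ≤ n) : (Nat.digits 10 n).sum < n := by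
  rw [Nat.digits_def' (by norm_num : 1 < 10) (by omega : 0 < n)]
  have := Nat.digit_sum_le 10 (n / 10)
  simp only [List.sum_cons]
  omega

lemma digit_sum_pos (n : Nat) : 0 < n → 0 < (Nat.digits 10 n).sum := by
  induction n using Nat.strong_induction_on with
  | _ n ih =>
    intro hn
    rw [Nat.digits_def' (by norm_num : 1 < 10) hn]
    simp only [List.sum_cons]
    by_cases hr : 0 < n % 10
    · omega
    · have hd : 0 < n / 10 := by omega
      have := ih (n / 10) (Nat.div_lt_self hn (by norm_num)) hd
      omega

-- the while-loop computes the closed-form digital root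
lemma reduce_eq (f : Nat) : ∀ (t : Int), 0 ≤ t → t ≤ (f : Int) →
    a_reduce f t = (if t = 0 then 0 else 1 + (t - 1) % 9) := by
  induction f with
  | zero =>
    intro t h1 h2
    have ht : t = 0 := by omega
    subst ht; simp [a_reduce]
  | succ f ih =>
    intro t h1 h2
    unfold a_reduce
    by_cases h9 : 9 < t
    · rw [if_pos h9]
      have hds := a_digitSum_eq t h1
      have hn10 : 10 ≤ t.toNat := by omega
      have hlt := digit_sum_lt t.toNat hn10
      have hpos := digit_sum_pos t.toNat (by omega)
      have hmod : t.toNat % 9 = (Nat.digits 10 t.toNat).sum % 9 :=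
        Nat.modEq_digits_sum 9 10 (by norm_num) t.toNat
      have hb0 : 0 ≤ a_digitSum t := by rw [hds]; exact Int.natCast_nonneg _
      have hb1 : a_digitSum t ≤ (f : Int) := by rw [hds]; omega
      rw [ih (a_digitSum t) hb0 hb1, hds,
          if_neg (by omega : ¬ ((Nat.digits 10 t.toNat).sum : Int) = 0),
          if_neg (by omega : ¬ t = 0)]
      omega
    · rw [if_neg h9]
      by_cases h0 : t = 0
      · simp [h0]
      · rw [if_neg h0]; omega

-- the two root computations agree for any nonnegative total
lemma roots_agree (S : Int) (h : 0 ≤ S) :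
    (if S = 11 ∨ S = 22 ∨ S = 33 then S else a_reduce S.toNat S)
      = (if S = 11 ∨ S = 22 ∨ S = 33 then S
         else if S = 0 then 0 else 1 + PySem.Int.mod (S - 1) 9) := by
  by_cases hm : S = 11 ∨ S = 22 ∨ S = 33
  · simp [hm]
  · rw [if_neg hm, if_neg hm,
        reduce_eq S.toNat S h (by omega),
        PySem.Int.mod_eq_emod_of_pos (by norm_num : (0:Int) < 9)]

-- ===== VERDICT (by name: the statement is the Claim_ definition above) =====
theorem calculate_chaldean_numbers_spec : Claim_equal_calculate_chaldean_numbers := by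
  intro name _
  unfold Spec_calculate_chaldean_numbers calculate_chaldean_numbers calculate_chaldean_numbers_alt
  simp only [freq_getD, foldl_eq_weighted_sum, zero_add]
  rw [roots_agree _ (total_nonneg _)]
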